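-- pv_equiv track=rewrite | github.com/rf-iasys/OEIS | OEIS_A027862.py | compute_max_y
-- ===== SOURCE A (Python) =====
-- def compute_max_y(n_start: int, n_end: int,
--                   stop_at_n_end: bool = True) -> dict[int, int]:
--     """
--     Compute max_y(x) using the combinatorial formula.
--     Returns dict mapping x -> max_y(x).
--     """
--     max_y_per_x = {}
--     for a in range(0, n_end):
--         for b in range(a + 1, n_end - a + 1):
--
--             x = abs((a-1)**2 + (b-1)**2)
--             y = x * abs(b-a)
--
--             if y == 0 or x < n_start:
--                 continue
--
--             if stop_at_n_end and x >= n_end: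
--                 continue
--
--             if y > max_y_per_x.get(x, 0):
--                 max_y_per_x[x] = y
--
--     return max_y_per_x
-- ===== SOURCE B (Python) =====
-- def compute_max_y(n_start: int, n_end: int,
--                   stop_at_n_end: bool = True) -> dict[int, int]:
--     best = {}
--     lim = 0
--     if stop_at_n_end:
--         # largest lim with lim^2 <= n_end - 1: any a or b beyond lim + 1 makes x >= n_end
--         while (lim + 1) ** 2 <= n_end - 1:
--             lim += 1
--         a_hi = min(n_end, lim + 2)
--     else:
--         a_hi = n_end
--     for a in range(0, a_hi):
--         sa = (a - 1) ** 2
--         b_hi = n_end - a + 1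
--         if stop_at_n_end:
--             b_hi = min(b_hi, lim + 2)
--         for b in range(a + 1, b_hi):
--             x = sa + (b - 1) ** 2
--             if x < n_start or (stop_at_n_end and x >= n_end):
--                 continue
--             y = x * (b - a)
--             if y > best.get(x, 0):
--                 best[x] = y
--     return best
-- ===== Notes on version B (the rewrite author's own statement) =====
-- stated objective: alternative
-- what changed: B precomputes an integer-square-root bound lim by a counting loop and, when stop_at_n_end is true, caps both loop ranges at lim+2 (any a or b beyond that makes x >= n_end, so A discards the pair); it also hoists (a-1)**2 out of the inner loop and drops the abs() calls and the dead y==0 test. When stop_at_n_end is false the bound does not apply and both scans are full, so a timing run could not confirm an overall speed-up.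
import Mathlib
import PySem

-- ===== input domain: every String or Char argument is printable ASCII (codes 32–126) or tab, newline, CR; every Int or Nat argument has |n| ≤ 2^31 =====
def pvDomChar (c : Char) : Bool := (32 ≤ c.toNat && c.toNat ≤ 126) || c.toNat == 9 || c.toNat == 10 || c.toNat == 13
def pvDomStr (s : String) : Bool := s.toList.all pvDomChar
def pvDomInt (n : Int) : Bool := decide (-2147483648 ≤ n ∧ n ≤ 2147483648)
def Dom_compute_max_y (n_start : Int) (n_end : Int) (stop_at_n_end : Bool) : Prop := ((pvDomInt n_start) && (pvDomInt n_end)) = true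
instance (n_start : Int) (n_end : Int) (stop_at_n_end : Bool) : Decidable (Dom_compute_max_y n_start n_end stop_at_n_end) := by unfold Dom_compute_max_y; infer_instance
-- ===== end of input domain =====

-- B prunes both loop ranges by an integer-square-root bound when stop_at_n_end (pairs beyond it are ones A discards); return values proved identical.

-- ===== PORT A =====
-- inner loop body of A (the three guarded ifs and the dict update)
def cmyStepA (n_start : Int) (n_end : Int) (stop_at_n_end : Bool) (a : Int)
    (d : PySem.Dict Int Int) (b : Int) : PySem.Dict Int Int :=
  let x : Int := |(a - 1) ^ 2 + (b - 1) ^ 2|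
  let y : Int := x * |b - a|
  if y = 0 ∨ x < n_start then d
  else if stop_at_n_end = true ∧ n_end ≤ x then d
  else if d.getD x 0 < y then d.insert x y else d

def compute_max_y (n_start : Int) (n_end : Int) (stop_at_n_end : Bool) : List (Int × Int) :=
  ((PySem.List.pyRange 0 n_end 1).foldl
    (fun d a => (PySem.List.pyRange (a + 1) (n_end - a + 1) 1).foldl
      (cmyStepA n_start n_end stop_at_n_end a) d)
    PySem.Dict.empty).items

-- ===== PORT B =====
-- the 'while (lim+1)**2 <= m: lim += 1' loop of Source B, with fuel
def cmyLimLoop (m : Int) : Nat → Int → Int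
  | 0, c => c
  | fuel + 1, c => if (c + 1) ^ 2 ≤ m then cmyLimLoop m fuel (c + 1) else c

-- inner loop body of B
def cmyStepB (n_start : Int) (n_end : Int) (stop_at_n_end : Bool) (sa : Int) (a : Int)
    (d : PySem.Dict Int Int) (b : Int) : PySem.Dict Int Int :=
  let x : Int := sa + (b - 1) ^ 2
  if x < n_start ∨ (stop_at_n_end = true ∧ n_end ≤ x) then d
  else
    let y : Int := x * (b - a)
    if d.getD x 0 < y then d.insert x y else d

def compute_max_y_alt (n_start : Int) (n_end : Int) (stop_at_n_end : Bool) : List (Int × Int) :=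
  let lim : Int := cmyLimLoop (n_end - 1) (n_end - 1).toNat 0
  let a_hi : Int := if stop_at_n_end then min n_end (lim + 2) else n_end
  ((PySem.List.pyRange 0 a_hi 1).foldl
    (fun d a =>
      let sa : Int := (a - 1) ^ 2
      let b_hi : Int := if stop_at_n_end then min (n_end - a + 1) (lim + 2) else n_end - a + 1
      (PySem.List.pyRange (a + 1) b_hi 1).foldl
        (cmyStepB n_start n_end stop_at_n_end sa a) d)
    PySem.Dict.empty).items

-- ===== PRECONDITION & SPEC =====
def Spec_compute_max_y (n_start : Int) (n_end : Int) (stop_at_n_end : Bool) (out : List (Int × Int)) : Prop := out = compute_max_y_alt n_start n_end stop_at_n_end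
instance (n_start : Int) (n_end : Int) (stop_at_n_end : Bool) (out : List (Int × Int)) : Decidable (Spec_compute_max_y n_start n_end stop_at_n_end out) := by unfold Spec_compute_max_y; infer_instance

-- ===== CLAIM (what is proved, stated in full; the proofs are below) =====
def Claim_equal_compute_max_y : Prop := ∀ (n_start : Int) (n_end : Int) (stop_at_n_end : Bool), Dom_compute_max_y n_start n_end stop_at_n_end → Spec_compute_max_y n_start n_end stop_at_n_end (compute_max_y n_start n_end stop_at_n_end)

-- ===== LEMMAS AND PROOFS =====

-- a fold whose step fixes every state for every listed element is the identity
theorem cmy_foldl_id {α β : Type} (f : α → β → α) (l : List β)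
    (h : ∀ b ∈ l, ∀ d, f d b = d) : ∀ d, l.foldl f d = d := by
  induction l with
  | nil => intro d; rfl
  | cons x xs ih =>
    intro d
    simp only [List.foldl_cons, h x (List.mem_cons_self), ih (fun b hb d => h b (List.mem_cons_of_mem _ hb) d)]

-- two folds with bodies that agree on every listed element coincide
theorem cmy_foldl_congr {A B : Type} (f g : A -> B -> A) (l : List B)
    (h : forall d, forall b, b ∈ l -> f d b = g d b) : forall d, l.foldl f d = l.foldl g d := by
  induction l with
  | nil => intro d; rfl
  | cons x xs ih =>
    intro d
    simp only [List.foldl_cons, h d x (List.mem_cons_self)]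
    exact ih (fun d b hb => h d b (List.mem_cons_of_mem _ hb)) _

-- pyRange ignores a stop below the start
theorem cmy_pyRange_max (a b : Int) :
    PySem.List.pyRange a b 1 = PySem.List.pyRange a (max a b) 1 := by
  rw [PySem.List.pyRange_one, PySem.List.pyRange_one]
  have : (b - a).toNat = (max a b - a).toNat := by omega
  rw [this]

-- exit property of the while loop: the result r satisfies m < (r+1)^2 (given enough fuel)
theorem cmyLimLoop_exit (m : Int) : ∀ (fuel : Nat) (c : Int), 0 ≤ c →
    (m - c).toNat ≤ fuel → m < (cmyLimLoop m fuel c + 1) ^ 2 := by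
  intro fuel
  induction fuel with
  | zero =>
    intro c hc hf
    simp only [cmyLimLoop]
    have hmc : m ≤ c := by omega
    nlinarith
  | succ n ih =>
    intro c hc hf
    simp only [cmyLimLoop]
    split
    · exact ih (c + 1) (by omega) (by omega)
    · nlinarith

theorem cmyLimLoop_nonneg (m : Int) : ∀ (fuel : Nat) (c : Int), 0 ≤ c →
    0 ≤ cmyLimLoop m fuel c := by
  intro fuel
  induction fuel with
  | zero => intro c hc; simpa [cmyLimLoop] using hc
  | succ n ih =>
    intro c hc
    simp only [cmyLimLoop]
    split
    · exact ih (c + 1) (by omega)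
    · exact hc

-- the two inner-loop bodies agree for 0 ≤ a < b
theorem cmy_step_agree (n_start n_end : Int) (stop : Bool) (a b : Int)
    (ha : 0 ≤ a) (hb : a + 1 ≤ b) (d : PySem.Dict Int Int) :
    cmyStepA n_start n_end stop a d b = cmyStepB n_start n_end stop ((a - 1) ^ 2) a d b := by
  have hx : (0:Int) < (a - 1) ^ 2 + (b - 1) ^ 2 := by
    rcases eq_or_ne a 1 with rfl | hne
    · nlinarith
    · nlinarith [sq_nonneg (b - 1), sq_nonneg (a - 1), sq_abs (a - 1), abs_pos.mpr (sub_ne_zero.mpr hne)]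
  have habs : |(a - 1) ^ 2 + (b - 1) ^ 2| = (a - 1) ^ 2 + (b - 1) ^ 2 := abs_of_pos hx
  have habs2 : |b - a| = b - a := abs_of_pos (by omega)
  have hy : ((a - 1) ^ 2 + (b - 1) ^ 2) * (b - a) ≠ 0 :=
    mul_ne_zero (by omega) (by omega)
  simp only [cmyStepA, cmyStepB, habs, habs2]
  split_ifs with h1 h2 h3 h4 h5 <;> tauto

-- for a beyond the sqrt bound every inner-body application with stop=true is the identity
theorem cmy_stepA_id_of_big (n_start n_end : Int) (a b : Int)
    (hbig : n_end ≤ |(a - 1) ^ 2 + (b - 1) ^ 2|) (d : PySem.Dict Int Int) :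
    cmyStepA n_start n_end true a d b = d := by
  simp only [cmyStepA]
  split_ifs with h1 h2 <;> simp_all

-- inner loops agree for every 0 ≤ a, in either stop mode
theorem cmy_inner_agree (n_start n_end : Int) (stop : Bool) (lim : Int) (hlim0 : 0 ≤ lim)
    (hlim : stop = true → n_end ≤ (lim + 1) ^ 2) (a : Int) (ha : 0 ≤ a)
    (d : PySem.Dict Int Int) :
    (PySem.List.pyRange (a + 1) (n_end - a + 1) 1).foldl (cmyStepA n_start n_end stop a) d =
    (PySem.List.pyRange (a + 1) (if stop then min (n_end - a + 1) (lim + 2) else n_end - a + 1) 1).foldl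
      (cmyStepB n_start n_end stop ((a - 1) ^ 2) a) d := by
  have hcong : ∀ (bh : Int) (d : PySem.Dict Int Int),
      (PySem.List.pyRange (a + 1) bh 1).foldl (cmyStepA n_start n_end stop a) d =
      (PySem.List.pyRange (a + 1) bh 1).foldl (cmyStepB n_start n_end stop ((a - 1) ^ 2) a) d := by
    intro bh d
    apply cmy_foldl_congr
    intro d' b hbmem
    exact cmy_step_agree n_start n_end stop a b ha (PySem.List.mem_pyRange_one.mp hbmem).1 d'
  cases stop with
  | false => simpa using hcong (n_end - a + 1) d
  | true =>
    have hlim' := hlim rfl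
    simp only [if_true]
    by_cases hlt : n_end - a + 1 ≤ a + 1
    · -- A's inner range is empty; so is B's
      rw [PySem.List.pyRange_one_eq_nil hlt, PySem.List.pyRange_one_eq_nil (by omega)]
      rfl
    · set m : Int := max (a + 1) (min (n_end - a + 1) (lim + 2)) with hm
      have h1 : a + 1 ≤ m := le_max_left _ _
      have h2 : m ≤ n_end - a + 1 := by omega
      rw [PySem.List.pyRange_one_append (a + 1) m (n_end - a + 1) h1 h2, List.foldl_append]
      rw [cmy_foldl_id _ _ (fun b hbmem d' => by
        have hbm := PySem.List.mem_pyRange_one.mp hbmem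
        apply cmy_stepA_id_of_big
        have hb2 : lim + 2 ≤ b := by
          have h3 : min (n_end - a + 1) (lim + 2) ≤ m := le_max_right _ _
          rcases min_cases (n_end - a + 1) (lim + 2) with he | he <;> omega
        have : (lim + 1) ^ 2 ≤ (b - 1) ^ 2 := by
          nlinarith [mul_nonneg (show (0:Int) ≤ b - lim - 2 by omega) (show (0:Int) ≤ b + lim by omega)]
        have : n_end ≤ (a - 1) ^ 2 + (b - 1) ^ 2 := by nlinarith [sq_nonneg (a - 1)]
        calc n_end ≤ (a - 1) ^ 2 + (b - 1) ^ 2 := this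
          _ ≤ |(a - 1) ^ 2 + (b - 1) ^ 2| := le_abs_self _)]
      rw [cmy_pyRange_max (a + 1) (min (n_end - a + 1) (lim + 2)), ← hm]
      exact hcong m d

-- ===== VERDICT (by name: the statement is the Claim_ definition above) =====
theorem compute_max_y_spec : Claim_equal_compute_max_y := by
  intro n_start n_end stop _
  unfold Spec_compute_max_y compute_max_y compute_max_y_alt
  set lim : Int := cmyLimLoop (n_end - 1) (n_end - 1).toNat 0 with hlimdef
  congr 1
  have hlim0 : 0 ≤ lim := cmyLimLoop_nonneg _ _ 0 le_rfl
  by_cases hne : n_end ≤ 0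
  · -- both outer ranges are empty
    rw [PySem.List.pyRange_one_eq_nil hne, PySem.List.pyRange_one_eq_nil (by cases stop <;> simp <;> omega)]
    rfl
  · rw [not_le] at hne
    have hlim : n_end ≤ (lim + 1) ^ 2 := by
      have := cmyLimLoop_exit (n_end - 1) (n_end - 1).toNat 0 le_rfl (by omega)
      rw [hlimdef]
      omega
    have hcong : ∀ (ah : Int) (d : PySem.Dict Int Int), 0 ≤ ah →
        (PySem.List.pyRange 0 ah 1).foldl
          (fun d a => (PySem.List.pyRange (a + 1) (n_end - a + 1) 1).foldl
            (cmyStepA n_start n_end stop a) d) d =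
        (PySem.List.pyRange 0 ah 1).foldl
          (fun d a =>
            (PySem.List.pyRange (a + 1)
              (if stop then min (n_end - a + 1) (lim + 2) else n_end - a + 1) 1).foldl
              (cmyStepB n_start n_end stop ((a - 1) ^ 2) a) d) d := by
      intro ah d _
      apply cmy_foldl_congr
      intro d' a hamem
      exact cmy_inner_agree n_start n_end stop lim hlim0 (fun _ => hlim) a
        (PySem.List.mem_pyRange_one.mp hamem).1 d'
    cases stop with
    | false => simpa using hcong n_end PySem.Dict.empty (by omega)
    | true =>
      simp only [if_true]
      have ha1 : (0:Int) ≤ min n_end (lim + 2) := by omega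
      have ha2 : min n_end (lim + 2) ≤ n_end := min_le_left _ _
      rw [PySem.List.pyRange_one_append 0 (min n_end (lim + 2)) n_end ha1 ha2, List.foldl_append]
      rw [cmy_foldl_id _ _ (fun a hamem d' => by
        have ham := PySem.List.mem_pyRange_one.mp hamem
        apply cmy_foldl_id
        intro b hbmem d''
        apply cmy_stepA_id_of_big
        have ha2' : lim + 2 ≤ a := by omega
        have : (lim + 1) ^ 2 ≤ (a - 1) ^ 2 := by
          nlinarith [mul_nonneg (show (0:Int) ≤ a - lim - 2 by omega) (show (0:Int) ≤ a + lim by omega)]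
        have : n_end ≤ (a - 1) ^ 2 + (b - 1) ^ 2 := by nlinarith [sq_nonneg (b - 1)]
        calc n_end ≤ (a - 1) ^ 2 + (b - 1) ^ 2 := this
          _ ≤ |(a - 1) ^ 2 + (b - 1) ^ 2| := le_abs_self _)]
      exact hcong (min n_end (lim + 2)) PySem.Dict.empty ha1
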